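-- pv_equiv track=rewrite | github.com/bica-tools/reticulate | reticulate/ihara.py | _is_proper_power
-- ===== SOURCE A (Python) =====
-- def _is_proper_power(path: tuple[int, ...] | list[int]) -> bool:
--     """Check if a cyclic sequence is a proper power of a shorter sequence."""
--     n = len(path)
--     for d in range(1, n):
--         if n % d != 0:
--             continue
--         if d == n:
--             continue
--         period = list(path[:d])
--         is_power = True
--         for i in range(n):
--             if path[i] != period[i % d]:
--                 is_power = False
--                 break
--         if is_power:
--             return True
--     return False
-- ===== SOURCE B (Python) =====
-- def _shift_periodic(path, d):
--     return all(path[i] == path[i - d] for i in range(d, len(path)))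
--
--
-- def _is_proper_power(path: tuple[int, ...] | list[int]) -> bool:
--     """Check if a cyclic sequence is a proper power of a shorter sequence."""
--     n = len(path)
--     # distinct prime factors of n by trial division
--     m, p = n, 2
--     factors = []
--     while p * p <= m:
--         if m % p == 0:
--             factors.append(p)
--             while m % p == 0:
--                 m //= p
--         p += 1
--     if m > 1:
--         factors.append(m)
--     # proper power iff periodic with period n//p for some prime p | n
--     return any(_shift_periodic(path, n // p) for p in factors)
-- ===== Notes on version B (the rewrite author's own statement) =====
-- stated objective: faster
-- what changed: Instead of scanning every proper divisor d of n and verifying the period with a full modular-index pass (A), B factors n by trial division and verifies periodicity only for the maximal proper periods n/p, one per distinct prime p of n, using a shift comparison path[i]==path[i-d].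
import Mathlib
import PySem

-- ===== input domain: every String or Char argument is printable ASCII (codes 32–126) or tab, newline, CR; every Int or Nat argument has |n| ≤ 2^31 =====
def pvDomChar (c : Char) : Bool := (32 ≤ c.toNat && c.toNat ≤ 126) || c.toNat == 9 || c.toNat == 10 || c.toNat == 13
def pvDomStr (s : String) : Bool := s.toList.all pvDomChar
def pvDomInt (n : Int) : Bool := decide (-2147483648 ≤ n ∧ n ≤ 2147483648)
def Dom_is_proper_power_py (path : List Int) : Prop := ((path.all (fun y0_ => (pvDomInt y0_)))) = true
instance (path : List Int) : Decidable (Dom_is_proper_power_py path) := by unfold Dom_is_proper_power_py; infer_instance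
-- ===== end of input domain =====

-- B replaces A's scan over all proper divisors of n by trial-division prime factorisation of n,
-- testing only the maximal proper periods n/p for the distinct primes p dividing n (alternative algorithm, fewer period checks).


-- ===== PORT A =====
-- for d in range(1, n): skip if n % d != 0 or d == n; else compare path[i] with period[i % d] for all i in range(n)
def is_proper_power_py (path : List Int) : Bool :=
  let n := path.length
  (List.range' 1 (n - 1)).any (fun d =>
    if n % d ≠ 0 then false
    else if d = n then false
    else
      let period := path.take d
      (List.range n).all (fun i => path.getD i 0 == period.getD (i % d) 0))

-- ===== PORT B =====
-- _shift_periodic: all(path[i] == path[i - d] for i in range(d, len(path)))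
def shiftPeriodic (path : List Int) (d : Nat) : Bool :=
  (List.range' d (path.length - d)).all (fun i => path.getD i 0 == path.getD (i - d) 0)

-- inner loop 'while m % p == 0: m //= p'; fuel m suffices (m strictly decreases), a pure totality guard
def stripGo : Nat → Nat → Nat → Nat
  | 0, m, _ => m
  | f + 1, m, p => if 2 ≤ p ∧ 1 ≤ m ∧ m % p = 0 then stripGo f (m / p) p else m

-- outer loop 'while p * p <= m' collecting the distinct prime factors; fuel m+1 suffices, a pure totality guard
def factGo : Nat → Nat → Nat → List Nat
  | 0, _, _ => []
  | f + 1, m, p =>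
    if p * p ≤ m then
      if m % p = 0 then p :: factGo f (stripGo m m p) (p + 1)
      else factGo f m (p + 1)
    else if 1 < m then [m] else []

def is_proper_power_py_alt (path : List Int) : Bool :=
  let n := path.length
  (factGo (n + 1) n 2).any (fun p => shiftPeriodic path (n / p))

-- ===== PRECONDITION & SPEC =====
def Spec_is_proper_power_py (path : List Int) (out : Bool) : Prop := out = is_proper_power_py_alt path
instance (path : List Int) (out : Bool) : Decidable (Spec_is_proper_power_py path out) := by unfold Spec_is_proper_power_py; infer_instance

-- ===== CLAIM (what is proved, stated in full; the proofs are below) =====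
def Claim_equal_is_proper_power_py : Prop := ∀ (path : List Int), Dom_is_proper_power_py path → Spec_is_proper_power_py path (is_proper_power_py path)

-- ===== LEMMAS AND PROOFS =====

-- d-periodicity, modular form (A's inner check) and shift form (B's inner check)
def Pmod (path : List Int) (d : Nat) : Prop := ∀ i < path.length, path.getD i 0 = path.getD (i % d) 0
def Pshift (path : List Int) (d : Nat) : Prop := ∀ i, d ≤ i → i < path.length → path.getD i 0 = path.getD (i - d) 0

theorem stripGo_dvd (f m p : Nat) (hf : m ≤ f) : stripGo f m p ∣ m := by
  induction f generalizing m with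
  | zero => simp [stripGo]
  | succ f ih =>
    simp only [stripGo]
    split
    · rename_i h
      have hp : 2 ≤ p := h.1
      have hdvd : p ∣ m := Nat.dvd_of_mod_eq_zero h.2.2
      have h1 : m / p < m := Nat.div_lt_self h.2.1 (by omega)
      exact (ih (m / p) (by omega)).trans (Nat.div_dvd_of_dvd hdvd)
    · exact dvd_rfl

theorem stripGo_pos (f m p : Nat) (hf : m ≤ f) (hm : 1 ≤ m) : 1 ≤ stripGo f m p :=
  Nat.pos_of_dvd_of_pos (stripGo_dvd f m p hf) hm

theorem stripGo_not_dvd (f m p : Nat) (hf : m ≤ f) (hp : 2 ≤ p) (hm : 1 ≤ m) :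
    ¬ p ∣ stripGo f m p := by
  induction f generalizing m with
  | zero => omega
  | succ f ih =>
    simp only [stripGo]
    split
    · rename_i h
      have h1 : m / p < m := Nat.div_lt_self h.2.1 (by omega)
      have h2 : 1 ≤ m / p := Nat.one_le_div_iff (by omega) |>.2 (Nat.le_of_dvd hm (Nat.dvd_of_mod_eq_zero h.2.2))
      exact ih (m / p) (by omega) h2
    · rename_i h
      intro hc
      exact h ⟨hp, hm, Nat.dvd_iff_mod_eq_zero.mp hc⟩

theorem stripGo_lt (f m p : Nat) (hf : m ≤ f) (hp : 2 ≤ p) (hd : p ∣ m) (hm : 1 ≤ m) :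
    stripGo f m p < m := by
  cases f with
  | zero => omega
  | succ f =>
    simp only [stripGo]
    rw [if_pos ⟨hp, hm, Nat.dvd_iff_mod_eq_zero.mp hd⟩]
    have h1 : m / p < m := Nat.div_lt_self hm (by omega)
    have hpos : 1 ≤ m / p := Nat.one_le_div_iff (by omega) |>.2 (Nat.le_of_dvd hm hd)
    have h2 : stripGo f (m / p) p ∣ m / p := stripGo_dvd f (m / p) p (by omega)
    exact Nat.lt_of_le_of_lt (Nat.le_of_dvd hpos h2) h1

theorem stripGo_prime_dvd (f m p q : Nat) (hf : m ≤ f) (hq : q.Prime) (hpp : p.Prime)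
    (hqp : q ≠ p) (h : q ∣ m) : q ∣ stripGo f m p := by
  induction f generalizing m with
  | zero => simpa [stripGo] using h
  | succ f ih =>
    simp only [stripGo]
    split
    · rename_i hcond
      have hdvd : p ∣ m := Nat.dvd_of_mod_eq_zero hcond.2.2
      have h1 : m / p < m := Nat.div_lt_self hcond.2.1 (by omega)
      apply ih (m / p) (by omega)
      have : q ∣ p * (m / p) := by rwa [Nat.mul_div_cancel' hdvd]
      rcases (Nat.Prime.dvd_mul hq).1 this with hqp' | hok
      · exact absurd ((Nat.prime_dvd_prime_iff_eq hq hpp).1 hqp') hqp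
      · exact hok
    · exact h

theorem factGo_spec (f : Nat) : ∀ m p, 2 ≤ p → 1 ≤ m → 1 ≤ f → m + 2 - p ≤ f →
    (∀ q, q.Prime → q ∣ m → p ≤ q) →
    ∀ x, x ∈ factGo f m p ↔ x.Prime ∧ x ∣ m := by
  induction f with
  | zero => omega
  | succ f ih =>
    intro m p hp hm _ hf hinv x
    simp only [factGo]
    split
    · rename_i hpm
      have hpm' : p ≤ m := le_trans (Nat.le_mul_of_pos_left p (by omega)) hpm
      split
      · rename_i hmod
        have hdvd : p ∣ m := Nat.dvd_of_mod_eq_zero hmod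
        -- p is prime: any prime factor q of p divides m, so p ≤ q ≤ p
        have hppr : p.Prime := by
          obtain ⟨q, hqpr, hqp⟩ := Nat.exists_prime_and_dvd (show p ≠ 1 by omega)
          have hq : q ∣ m := hqp.trans hdvd
          have h1 : p ≤ q := hinv q hqpr hq
          have h2 : q ≤ p := Nat.le_of_dvd (by omega) hqp
          have : q = p := by omega
          rwa [← this]
        set m' := stripGo m m p with hm'
        have hm'dvd : m' ∣ m := stripGo_dvd m m p (le_refl m)
        have hm'pos : 1 ≤ m' := stripGo_pos m m p (le_refl m) hm
        have hm'lt : m' < m := stripGo_lt m m p (le_refl m) hp hdvd hm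
        have hnodvd : ¬ p ∣ m' := stripGo_not_dvd m m p (le_refl m) hp hm
        have hinv' : ∀ q, q.Prime → q ∣ m' → p + 1 ≤ q := by
          intro q hqpr hqd
          have h1 : p ≤ q := hinv q hqpr (hqd.trans hm'dvd)
          rcases Nat.lt_or_ge p q with h | h
          · omega
          · have : q = p := by omega
            subst this
            exact absurd hqd hnodvd
        rw [List.mem_cons, ih m' (p + 1) (by omega) hm'pos (by omega) (by omega) hinv' x]
        constructor
        · rintro (rfl | ⟨hxpr, hxd⟩)
          · exact ⟨hppr, hdvd⟩
          · exact ⟨hxpr, hxd.trans hm'dvd⟩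
        · rintro ⟨hxpr, hxd⟩
          by_cases hxp : x = p
          · exact Or.inl hxp
          · exact Or.inr ⟨hxpr, stripGo_prime_dvd m m p x (le_refl m) hxpr hppr hxp hxd⟩
      · rename_i hmod
        have hinv' : ∀ q, q.Prime → q ∣ m → p + 1 ≤ q := by
          intro q hqpr hqd
          have h1 : p ≤ q := hinv q hqpr hqd
          rcases Nat.lt_or_ge p q with h | h
          · omega
          · have : q = p := by omega
            subst this
            exact absurd (Nat.dvd_iff_mod_eq_zero.mp hqd) hmod
        exact ih m (p + 1) (by omega) hm (by omega) (by omega) hinv' x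
    · rename_i hpm
      split
      · rename_i hm1
        -- m is prime: every divisor k with 2 ≤ k, k*k ≤ m has a prime factor q ≥ p, but p*p > m
        have hmpr : m.Prime := by
          rw [Nat.prime_def_le_sqrt]
          refine ⟨hm1, fun k hk hks hkd => ?_⟩
          obtain ⟨q, hqpr, hqk⟩ := Nat.exists_prime_and_dvd (show k ≠ 1 by omega)
          have hqm : q ∣ m := hqk.trans hkd
          have h1 : p ≤ q := hinv q hqpr hqm
          have h2 : q ≤ k := Nat.le_of_dvd (by omega) hqk
          have h3 : k * k ≤ m := Nat.le_sqrt.1 hks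
          nlinarith
        simp only [List.mem_singleton]
        constructor
        · rintro rfl; exact ⟨hmpr, dvd_rfl⟩
        · rintro ⟨hxpr, hxd⟩
          exact (Nat.prime_dvd_prime_iff_eq hxpr hmpr).1 hxd
      · rename_i hm1
        have : m = 1 := by omega
        subst this
        simp only [List.not_mem_nil, false_iff, not_and]
        intro hxpr hxd
        exact absurd (Nat.eq_one_of_dvd_one hxd) hxpr.ne_one

theorem getD_take (path : List Int) (d j : Nat) (hj : j < d) :
    (path.take d).getD j 0 = path.getD j 0 := by
  simp [List.getD_eq_getElem?_getD, hj]

theorem A_char (path : List Int) :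
    is_proper_power_py path = true ↔
      ∃ d, 1 ≤ d ∧ d < path.length ∧ d ∣ path.length ∧ Pmod path d := by
  unfold is_proper_power_py Pmod
  simp only [List.any_eq_true, List.mem_range'_1]
  constructor
  · rintro ⟨d, ⟨hd1, hd2⟩, hbody⟩
    split_ifs at hbody with h1 h2
    rw [List.all_eq_true] at hbody
    simp only [ne_eq, not_not] at h1
    have hdn : d < path.length := by
      rcases Nat.eq_zero_or_pos path.length with h0 | hpos
      · omega
      · omega
    refine ⟨d, hd1, hdn, Nat.dvd_of_mod_eq_zero h1, fun i hi => ?_⟩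
    have := hbody i (List.mem_range.mpr hi)
    rw [beq_iff_eq] at this
    rwa [getD_take path d (i % d) (Nat.mod_lt i (by omega))] at this
  · rintro ⟨d, hd1, hd2, hdvd, hP⟩
    refine ⟨d, ⟨hd1, by omega⟩, ?_⟩
    rw [if_neg (by simp [Nat.dvd_iff_mod_eq_zero.mp hdvd]), if_neg (by omega)]
    rw [List.all_eq_true]
    intro i hi
    rw [beq_iff_eq, getD_take path d (i % d) (Nat.mod_lt i (by omega))]
    exact hP i (List.mem_range.mp hi)

theorem shiftPeriodic_iff (path : List Int) (d : Nat) :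
    shiftPeriodic path d = true ↔ Pshift path d := by
  unfold shiftPeriodic Pshift
  simp only [List.all_eq_true, List.mem_range'_1, beq_iff_eq]
  constructor
  · intro h i hdi hi
    exact h i ⟨hdi, by omega⟩
  · rintro h i ⟨hdi, hi⟩
    exact h i hdi (by omega)

theorem Pmod_to_Pshift {path : List Int} {d : Nat} (hd : 1 ≤ d) (h : Pmod path d) : Pshift path d := by
  intro i hdi hi
  rw [h i hi, h (i - d) (by omega), Nat.mod_eq_sub_mod hdi]

theorem Pshift_to_Pmod {path : List Int} {d : Nat} (hd : 1 ≤ d) (h : Pshift path d) : Pmod path d := by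
  intro i
  induction i using Nat.strong_induction_on with
  | _ i ih =>
    intro hi
    by_cases hdi : d ≤ i
    · rw [h i hdi hi, ih (i - d) (by omega) (by omega), ← Nat.mod_eq_sub_mod hdi]
    · rw [Nat.mod_eq_of_lt (by omega)]

theorem Pmod_mono {path : List Int} {d e : Nat} (hde : d ∣ e) (h : Pmod path d) : Pmod path e := by
  intro i hi
  rw [h i hi, h (i % e) (lt_of_le_of_lt (Nat.mod_le i e) hi), Nat.mod_mod_of_dvd i hde]

theorem B_char (path : List Int) (hn : 1 ≤ path.length) :
    is_proper_power_py_alt path = true ↔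
      ∃ p, p.Prime ∧ p ∣ path.length ∧ Pshift path (path.length / p) := by
  unfold is_proper_power_py_alt
  simp only [List.any_eq_true]
  have hspec := factGo_spec (path.length + 1) path.length 2 (by omega) hn (by omega) (by omega)
    (fun q hq _ => hq.two_le)
  constructor
  · rintro ⟨p, hpmem, hsp⟩
    obtain ⟨hppr, hpd⟩ := (hspec p).1 hpmem
    exact ⟨p, hppr, hpd, (shiftPeriodic_iff _ _).1 hsp⟩
  · rintro ⟨p, hppr, hpd, hps⟩
    exact ⟨p, (hspec p).2 ⟨hppr, hpd⟩, (shiftPeriodic_iff _ _).2 hps⟩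

theorem bridge (path : List Int) (hn : 1 ≤ path.length) :
    (∃ d, 1 ≤ d ∧ d < path.length ∧ d ∣ path.length ∧ Pmod path d) ↔
      (∃ p, p.Prime ∧ p ∣ path.length ∧ Pshift path (path.length / p)) := by
  constructor
  · rintro ⟨d, hd1, hd2, hdvd, hP⟩
    have hnd : d * (path.length / d) = path.length := Nat.mul_div_cancel' hdvd
    have hq : path.length / d ≠ 1 := fun h => by rw [h, mul_one] at hnd; omega
    obtain ⟨p, hppr, hpd⟩ := Nat.exists_prime_and_dvd hq
    have hpn : p ∣ path.length := hpd.trans (Nat.div_dvd_of_dvd hdvd)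
    have hdnp : d ∣ path.length / p := by
      obtain ⟨k, hk⟩ := hpd
      have hn' : path.length = d * k * p := by rw [← hnd, hk]; ring
      exact ⟨k, by rw [hn', Nat.mul_div_cancel _ hppr.pos]⟩
    have hdp1 : 1 ≤ path.length / p := Nat.div_pos (Nat.le_of_dvd (by omega) hpn) hppr.pos
    exact ⟨p, hppr, hpn, Pmod_to_Pshift hdp1 (Pmod_mono hdnp hP)⟩
  · rintro ⟨p, hppr, hpd, hPs⟩
    have hp2 := hppr.two_le
    have hdpos : 1 ≤ path.length / p := Nat.div_pos (Nat.le_of_dvd hn hpd) hppr.pos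
    exact ⟨path.length / p, hdpos, Nat.div_lt_self (by omega) (by omega),
      Nat.div_dvd_of_dvd hpd, Pshift_to_Pmod hdpos hPs⟩

-- ===== VERDICT (by name: the statement is the Claim_ definition above) =====
theorem is_proper_power_py_spec : Claim_equal_is_proper_power_py := by
  intro path _
  unfold Spec_is_proper_power_py
  by_cases hn : 1 ≤ path.length
  · have := (A_char path).trans ((bridge path hn).trans (B_char path hn).symm)
    cases hA : is_proper_power_py path <;> cases hB : is_proper_power_py_alt path <;> simp_all
  · have hpath : path = [] := by
      cases path with
      | nil => rfl
      | cons a l => simp at hn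
    subst hpath
    rfl
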